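-- pv_equiv track=rewrite | github.com/Achuttarsing/inflecteur | inflecteur/__init__.py | detect_person
-- ===== SOURCE A (Python) =====
-- def detect_person(tokens):
--     tokens = set([t.lower() for t in tokens])
--     if len(set(["je","j","j'",'nous']).intersection(tokens)) > 0:
--         return '1'
--     elif len(set(["tu","vous"]).intersection(tokens)) > 0:
--         return '2'
--     else:
--         return '3'
-- ===== SOURCE B (Python) =====
-- def detect_person(tokens):
--     def rank(t):
--         t = t.lower()
--         if t in ("je", "j", "j'", "nous"):
--             return 1
--         if t in ("tu", "vous"):
--             return 2
--         return 3
--     return str(min(map(rank, tokens), default=3))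
-- ===== Notes on version B (the rewrite author's own statement) =====
-- stated objective: alternative
-- what changed: Replaces A's set-construction plus two set intersections with a classify-then-aggregate scheme: each token is mapped to a numeric person rank (1, 2 or 3) and the answer is the minimum rank (default 3) rendered as a string.
import Mathlib
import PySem

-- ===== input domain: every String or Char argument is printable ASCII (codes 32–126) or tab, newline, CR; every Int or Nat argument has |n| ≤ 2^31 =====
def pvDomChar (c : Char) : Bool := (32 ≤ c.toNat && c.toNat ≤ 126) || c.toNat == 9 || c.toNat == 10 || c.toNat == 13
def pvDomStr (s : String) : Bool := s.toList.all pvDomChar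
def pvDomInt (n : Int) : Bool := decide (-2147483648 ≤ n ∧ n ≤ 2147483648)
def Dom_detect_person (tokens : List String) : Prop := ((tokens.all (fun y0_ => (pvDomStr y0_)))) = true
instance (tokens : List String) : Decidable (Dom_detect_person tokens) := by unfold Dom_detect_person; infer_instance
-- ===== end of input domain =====

-- B replaces A's set-construction and two set intersections with classify-then-aggregate: map each token to a numeric person rank and take the minimum (alternative decomposition, same cost).


-- ===== PORT A =====
def detect_person (tokens : List String) : String :=
  let tokens' : PySem.Set String := PySem.Set.ofList (tokens.map (fun t => PySem.Str.lower t))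
  if PySem.Set.len (PySem.Set.inter (PySem.Set.ofList ["je", "j", "j'", "nous"]) tokens') > 0 then "1"
  else if PySem.Set.len (PySem.Set.inter (PySem.Set.ofList ["tu", "vous"]) tokens') > 0 then "2"
  else "3"

-- ===== PORT B =====
-- B's helper rank(t): the grammatical-person rank of one token
def pvRank (t : String) : Int :=
  let lt := PySem.Str.lower t
  if lt == "je" || lt == "j" || lt == "j'" || lt == "nous" then 1
  else if lt == "tu" || lt == "vous" then 2
  else 3

-- str(min(map(rank, tokens), default=3))
def detect_person_alt (tokens : List String) : String :=
  PySem.Int.toStr ((PySem.List.min? (tokens.map pvRank) (fun x => x)).getD 3)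

-- ===== PRECONDITION & SPEC =====
def Spec_detect_person (tokens : List String) (out : String) : Prop := out = detect_person_alt tokens
instance (tokens : List String) (out : String) : Decidable (Spec_detect_person tokens out) := by unfold Spec_detect_person; infer_instance

-- ===== CLAIM (what is proved, stated in full; the proofs are below) =====
def Claim_equal_detect_person : Prop := ∀ (tokens : List String), Dom_detect_person tokens → Spec_detect_person tokens (detect_person tokens)

-- ===== LEMMAS AND PROOFS =====

-- the two membership tests as Booleans
def pvIsFirst (t : String) : Bool :=
  let lt := PySem.Str.lower t
  lt == "je" || lt == "j" || lt == "j'" || lt == "nous"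
def pvIsSecond (t : String) : Bool :=
  let lt := PySem.Str.lower t
  lt == "tu" || lt == "vous"

theorem pvRank_eq (t : String) :
    pvRank t = if pvIsFirst t then 1 else if pvIsSecond t then 2 else 3 := rfl

theorem pvRank_bounds (t : String) : 1 ≤ pvRank t ∧ pvRank t ≤ 3 := by
  rw [pvRank_eq]; split_ifs <;> omega

-- the running-min loop over ranks, characterised by the two any-flags
theorem fold_min_rank (tokens : List String) (a : Int) (h1 : 1 ≤ a) (h3 : a ≤ 3) :
    tokens.foldl (fun m t => min m (pvRank t)) a
      = if a = 1 ∨ tokens.any pvIsFirst = true then 1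
        else if a = 2 ∨ tokens.any pvIsSecond = true then 2 else 3 := by
  induction tokens generalizing a with
  | nil =>
    simp only [List.foldl_nil, List.any_nil]
    split_ifs <;> simp_all <;> omega
  | cons t ts ih =>
    rw [List.foldl_cons, ih (min a (pvRank t))
      (le_min h1 (pvRank_bounds t).1) (le_trans (min_le_left _ _) h3)]
    rw [pvRank_eq]
    simp only [List.any_cons]
    by_cases hf : pvIsFirst t = true
    · simp [hf, min_eq_right h1]
    · have hf0 : pvIsFirst t = false := by simpa using hf
      by_cases hs : pvIsSecond t = true
      · simp only [hf0, hs, if_true, if_neg (by simp : ¬ (false = true)), Bool.false_or,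
          Bool.true_or, or_true]
        by_cases hP : ts.any pvIsFirst = true
        · simp [hP]
        · have hP0 : ts.any pvIsFirst = false := by simpa using hP
          simp only [hP0]
          split_ifs <;> simp_all <;> omega
      · have hs0 : pvIsSecond t = false := by simpa using hs
        simp [hf0, hs0, min_eq_left h3]

theorem len_pos_iff (s : List String) : PySem.Set.len s > 0 ↔ s ≠ [] := by
  simp [PySem.Set.len]
  exact List.length_pos_iff

-- A's intersection test equals an existence statement over the tokens
theorem inter_pos_iff (L tokens : List String) :
    (PySem.Set.len (PySem.Set.inter (PySem.Set.ofList L)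
        (PySem.Set.ofList (tokens.map (fun t => PySem.Str.lower t)))) > 0)
    ↔ ∃ t ∈ tokens, PySem.Str.lower t ∈ L := by
  rw [len_pos_iff]
  constructor
  · intro h
    obtain ⟨x, hx⟩ := List.exists_mem_of_ne_nil _ h
    obtain ⟨hxL, hxT⟩ := (PySem.Set.mem_inter _ _ _).mp hx
    have hxL' := (PySem.Set.mem_ofList _ _).mp hxL
    have hxT' := (PySem.Set.mem_ofList _ _).mp hxT
    obtain ⟨t, ht, rfl⟩ := List.mem_map.mp hxT'
    exact ⟨t, ht, hxL'⟩
  · rintro ⟨t, ht, hL⟩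
    have hx : PySem.Str.lower t ∈ PySem.Set.inter (PySem.Set.ofList L)
        (PySem.Set.ofList (tokens.map (fun t => PySem.Str.lower t))) :=
      (PySem.Set.mem_inter _ _ _).mpr
        ⟨(PySem.Set.mem_ofList _ _).mpr hL,
         (PySem.Set.mem_ofList _ _).mpr (List.mem_map.mpr ⟨t, ht, rfl⟩)⟩
    exact List.ne_nil_of_mem hx

theorem any_first_iff (tokens : List String) :
    tokens.any pvIsFirst = true ↔ ∃ t ∈ tokens, PySem.Str.lower t ∈ ["je", "j", "j'", "nous"] := by
  rw [List.any_eq_true]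
  constructor
  · rintro ⟨t, ht, hm⟩
    refine ⟨t, ht, ?_⟩
    simp only [pvIsFirst, Bool.or_eq_true, beq_iff_eq] at hm
    simp only [List.mem_cons, List.not_mem_nil, or_false]
    tauto
  · rintro ⟨t, ht, hm⟩
    refine ⟨t, ht, ?_⟩
    simp only [List.mem_cons, List.not_mem_nil, or_false] at hm
    simp only [pvIsFirst, Bool.or_eq_true, beq_iff_eq]
    tauto

theorem any_second_iff (tokens : List String) :
    tokens.any pvIsSecond = true ↔ ∃ t ∈ tokens, PySem.Str.lower t ∈ ["tu", "vous"] := by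
  rw [List.any_eq_true]
  constructor
  · rintro ⟨t, ht, hm⟩
    refine ⟨t, ht, ?_⟩
    simp only [pvIsSecond, Bool.or_eq_true, beq_iff_eq] at hm
    simp only [List.mem_cons, List.not_mem_nil, or_false]
    tauto
  · rintro ⟨t, ht, hm⟩
    refine ⟨t, ht, ?_⟩
    simp only [List.mem_cons, List.not_mem_nil, or_false] at hm
    simp only [pvIsSecond, Bool.or_eq_true, beq_iff_eq]
    tauto

-- B's whole computation, characterised by the two any-flags
theorem alt_eq (tokens : List String) :
    detect_person_alt tokens
      = if tokens.any pvIsFirst then "1" else if tokens.any pvIsSecond then "2" else "3" := by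
  unfold detect_person_alt
  cases tokens with
  | nil => rfl
  | cons t ts =>
    rw [List.map_cons, PySem.List.min?_id_cons, Option.getD_some, List.foldl_map,
      fold_min_rank ts (pvRank t) (pvRank_bounds t).1 (pvRank_bounds t).2, pvRank_eq,
      List.any_cons, List.any_cons]
    by_cases hf : pvIsFirst t <;> by_cases hs : pvIsSecond t <;>
      rcases hA : ts.any pvIsFirst <;> rcases hB : ts.any pvIsSecond <;>
      simp only [hf, hs, if_true, Bool.or_true] <;>
      split_ifs <;> simp_all <;> decide

-- ===== VERDICT (by name: the statement is the Claim_ definition above) =====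
theorem detect_person_spec : Claim_equal_detect_person := by
  intro tokens _
  unfold Spec_detect_person detect_person
  rw [alt_eq]
  by_cases h1 : ∃ t ∈ tokens, PySem.Str.lower t ∈ ["je", "j", "j'", "nous"]
  · rw [if_pos ((inter_pos_iff _ _).mpr h1), (any_first_iff tokens).mpr h1, if_pos rfl]
  · rw [if_neg (fun hc => h1 ((inter_pos_iff _ _).mp hc)),
        if_neg (fun hc => h1 ((any_first_iff tokens).mp hc))]
    by_cases h2 : ∃ t ∈ tokens, PySem.Str.lower t ∈ ["tu", "vous"]
    · rw [if_pos ((inter_pos_iff _ _).mpr h2), (any_second_iff tokens).mpr h2, if_pos rfl]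
    · rw [if_neg (fun hc => h2 ((inter_pos_iff _ _).mp hc)),
        if_neg (fun hc => h2 ((any_second_iff tokens).mp hc))]
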